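-- pv_equiv track=rewrite | github.com/Mobilecomm-a-UST/backend-code | Soft_AT_Nokia/views.py | extract_site_id
-- ===== SOURCE A (Python) =====
-- def extract_site_id(dist_name):
--     """Extract site id from distName attribute."""
--     try:
--         parts = dist_name.split('/')
--         for part in parts:
--             if part.startswith("MRBTS-"):
--                 return part.split('-')[1]
--     except Exception:
--         return None
--     return None
-- ===== SOURCE B (Python) =====
-- def extract_site_id(dist_name):
--     """Extract site id from distName attribute."""
--     try:
--         _, sep, rest = ('/' + dist_name).partition('/MRBTS-')
--         if not sep:
--             return None
--         return rest.split('/', 1)[0].split('-', 1)[0]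
--     except Exception:
--         return None
-- ===== Notes on version B (the rewrite author's own statement) =====
-- stated objective: idiomatic
-- what changed: Instead of tokenising the string into segments and looping over them, B prepends '/' and does one boundary-anchored substring search with str.partition('/MRBTS-'), then slices the id out of the remainder with split(sep, 1)[0]; no segment list and no loop.
import Mathlib
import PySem

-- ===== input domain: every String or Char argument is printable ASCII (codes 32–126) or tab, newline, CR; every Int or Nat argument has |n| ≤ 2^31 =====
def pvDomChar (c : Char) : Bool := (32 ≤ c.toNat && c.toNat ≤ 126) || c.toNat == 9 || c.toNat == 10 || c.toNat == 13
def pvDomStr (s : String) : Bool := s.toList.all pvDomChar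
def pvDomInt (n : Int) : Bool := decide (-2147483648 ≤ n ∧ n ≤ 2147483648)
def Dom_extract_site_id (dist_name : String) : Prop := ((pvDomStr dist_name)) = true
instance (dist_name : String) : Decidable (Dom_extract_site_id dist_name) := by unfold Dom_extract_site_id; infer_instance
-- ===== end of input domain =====

-- B replaces split-into-segments plus a per-segment loop by one boundary-anchored
-- substring search ('/' + s).partition('/MRBTS-') (objective: idiomatic; return value only).

-- ===== PORT A =====
-- the 'for part in parts' loop; pyGet? none is the IndexError, caught by 'except' -> None
def pvLoopA : List (List Char) → Option (List Char)
  | [] => none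
  | p :: ps =>
      if PySem.Chars.startswith p "MRBTS-".toList then
        PySem.List.pyGet? (PySem.Chars.splitOn p "-".toList) 1
      else pvLoopA ps

def extract_site_id (dist_name : String) : Option String :=
  (pvLoopA (PySem.Chars.splitOn dist_name.toList "/".toList)).map String.ofList

-- ===== PORT B =====
-- "('/' + s).partition('/MRBTS-')": first-occurrence search; some = the part after the
-- separator, none = separator absent (Source B's 'if not sep: return None')
def pvPartAfter (pat : List Char) : List Char → Option (List Char)
  | [] => none
  | a :: t =>
      if List.isPrefixOf pat (a :: t) then some (List.drop pat.length (a :: t))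
      else pvPartAfter pat t

-- "l.split(c, 1)[0]": everything up to the first occurrence of c
def pvHeadTo (c : Char) (l : List Char) : List Char := l.takeWhile (· ≠ c)

def extract_site_id_alt (dist_name : String) : Option String :=
  (pvPartAfter "/MRBTS-".toList ('/' :: dist_name.toList)).map
    (fun rest => String.ofList (pvHeadTo '-' (pvHeadTo '/' rest)))

-- ===== PRECONDITION & SPEC =====
def Spec_extract_site_id (dist_name : String) (out : Option String) : Prop := out = extract_site_id_alt dist_name
instance (dist_name : String) (out : Option String) : Decidable (Spec_extract_site_id dist_name out) := by unfold Spec_extract_site_id; infer_instance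

-- ===== CLAIM (what is proved, stated in full; the proofs are below) =====
def Claim_equal_extract_site_id : Prop := ∀ (dist_name : String), Dom_extract_site_id dist_name → Spec_extract_site_id dist_name (extract_site_id dist_name)

-- ===== LEMMAS AND PROOFS =====

-- reference single-character split, structurally recursive (proof-side mirror of Chars.splitOn)
def pvSplit (c : Char) : List Char → List (List Char)
  | [] => [[]]
  | a :: t =>
      if a = c then [] :: pvSplit c t
      else
        match pvSplit c t with
        | h :: r => (a :: h) :: r
        | [] => [[a]]

def pvConsHead (x : List Char) : List (List Char) → List (List Char)
  | [] => [x]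
  | h :: r => (x ++ h) :: r

lemma pvSplit_ne_nil (c : Char) (l : List Char) : pvSplit c l ≠ [] := by
  induction l with
  | nil => simp [pvSplit]
  | cons a t ih =>
    simp only [pvSplit]
    split_ifs
    · simp
    · rcases h : pvSplit c t with _ | ⟨h1, r⟩ <;> simp

lemma pvSplit_head (c : Char) (l : List Char) :
    ∃ r, pvSplit c l = l.takeWhile (· ≠ c) :: r := by
  induction l with
  | nil => exact ⟨[], rfl⟩
  | cons a t ih =>
    obtain ⟨r, hr⟩ := ih
    by_cases h : a = c
    · subst h; exact ⟨pvSplit a t, by simp [pvSplit]⟩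
    · refine ⟨r, ?_⟩
      simp [pvSplit, h, hr]

lemma pvGo_eq (c : Char) : ∀ (fuel : Nat) (l cur : List Char) (acc : List (List Char)),
    l.length ≤ fuel →
    PySem.Chars.splitOn.go [c] fuel l cur acc =
      acc.reverse ++ pvConsHead cur.reverse (pvSplit c l) := by
  intro fuel
  induction fuel with
  | zero =>
    intro l cur acc hl
    have : l = [] := by cases l <;> simp_all
    subst this
    simp [PySem.Chars.splitOn.go, pvSplit, pvConsHead]
  | succ n ih =>
    intro l cur acc hl
    cases l with
    | nil => simp [PySem.Chars.splitOn.go, pvSplit, pvConsHead]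
    | cons a t =>
      by_cases h : a = c
      · subst h
        have hpre : List.isPrefixOf [a] (a :: t) = true := by simp [List.isPrefixOf]
        rw [PySem.Chars.splitOn.go]
        simp only [hpre, if_pos]
        have hdrop : List.drop [a].length (a :: t) = t := rfl
        rw [hdrop, ih t [] (cur.reverse :: acc) (by simpa using Nat.le_of_succ_le_succ hl)]
        rcases hs : pvSplit a t with _ | ⟨h1, r⟩
        · exact absurd hs (pvSplit_ne_nil a t)
        · simp [pvSplit, pvConsHead, hs]
      · have hpre : List.isPrefixOf [c] (a :: t) = false := by
          simp [List.isPrefixOf]; exact fun hc => absurd hc.symm h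
        rw [PySem.Chars.splitOn.go]
        simp only [hpre, Bool.false_eq_true, if_neg, not_false_iff]
        rw [ih t (a :: cur) acc (by simpa using Nat.le_of_succ_le_succ hl)]
        rcases hs : pvSplit c t with _ | ⟨h1, r⟩
        · exact absurd hs (pvSplit_ne_nil c t)
        · simp [pvSplit, h, pvConsHead, hs]

lemma pvSplitOn_eq (c : Char) (l : List Char) :
    PySem.Chars.splitOn l [c] = pvSplit c l := by
  unfold PySem.Chars.splitOn
  rw [pvGo_eq c (l.length + 1) l [] [] (by omega)]
  rcases hs : pvSplit c l with _ | ⟨h1, r⟩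
  · exact absurd hs (pvSplit_ne_nil c l)
  · simp [pvConsHead]

lemma pvSplit_append (c : Char) (pre suf : List Char) (h : ∀ x ∈ pre, x ≠ c) :
    pvSplit c (pre ++ c :: suf) = pre :: pvSplit c suf := by
  induction pre with
  | nil => simp [pvSplit]
  | cons a p ih =>
    have ha : a ≠ c := h a (by simp)
    have := ih (fun x hx => h x (by simp [hx]))
    simp [pvSplit, ha, this]

lemma pvM_toList : "MRBTS-".toList = ['M', 'R', 'B', 'T', 'S', '-'] := rfl
lemma pvM7_toList : "/MRBTS-".toList = '/' :: "MRBTS-".toList := rfl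

-- B's value as a function of the partition remainder
def pvF (rest : List Char) : List Char := pvHeadTo '-' (pvHeadTo '/' rest)

-- matched case: if cs starts with "MRBTS-", A's loop returns the id slice directly
lemma pvMatched (cs : List Char) (hM : "MRBTS-".toList <+: cs) :
    pvLoopA (pvSplit '/' cs) = some (pvF (List.drop 6 cs)) := by
  obtain ⟨rest, hrest⟩ := hM
  rw [pvM_toList] at hrest
  obtain ⟨r, hr⟩ := pvSplit_head '/' cs
  have htw : cs.takeWhile (· ≠ '/') =
      ['M', 'R', 'B', 'T', 'S', '-'] ++ rest.takeWhile (· ≠ '/') := by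
    rw [← hrest]; simp
  have hswp : PySem.Chars.startswith (cs.takeWhile (· ≠ '/')) "MRBTS-".toList = true := by
    rw [htw, PySem.Chars.startswith_iff, pvM_toList]
    exact ⟨rest.takeWhile (· ≠ '/'), rfl⟩
  rw [hr]
  simp only [pvLoopA, hswp, if_pos]
  rw [htw]
  have hM5 : (['M', 'R', 'B', 'T', 'S', '-'] : List Char) ++ rest.takeWhile (· ≠ '/') =
      ['M', 'R', 'B', 'T', 'S'] ++ '-' :: rest.takeWhile (· ≠ '/') := rfl
  rw [hM5]
  have hsp : PySem.Chars.splitOn (['M', 'R', 'B', 'T', 'S'] ++ '-' :: rest.takeWhile (· ≠ '/')) "-".toList =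
      ['M', 'R', 'B', 'T', 'S'] :: pvSplit '-' (rest.takeWhile (· ≠ '/')) := by
    have h1 : "-".toList = ['-'] := rfl
    rw [h1, pvSplitOn_eq]
    exact pvSplit_append '-' ['M', 'R', 'B', 'T', 'S'] _ (by intro x hx; fin_cases hx <;> simp)
  rw [hsp]
  obtain ⟨r2, hr2⟩ := pvSplit_head '-' (rest.takeWhile (· ≠ '/'))
  rw [hr2]
  have hget : PySem.List.pyGet?
      (['M', 'R', 'B', 'T', 'S'] :: (rest.takeWhile (· ≠ '/')).takeWhile (· ≠ '-') :: r2) 1 =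
      some ((rest.takeWhile (· ≠ '/')).takeWhile (· ≠ '-')) := by
    simp [PySem.List.pyGet?, PySem.List.pyIdx?]
  rw [hget]
  have hdrop : List.drop 6 cs = rest := by rw [← hrest]; simp
  rw [hdrop]
  rfl

-- second invariant ⇒ first: prepending a '/' boundary makes the head segment eligible
lemma pvStep (cs : List Char)
    (h2 : (pvPartAfter "/MRBTS-".toList cs).map pvF = pvLoopA ((pvSplit '/' cs).tail)) :
    (pvPartAfter "/MRBTS-".toList ('/' :: cs)).map pvF = pvLoopA (pvSplit '/' cs) := by
  by_cases hM : "MRBTS-".toList <+: cs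
  · have hpre : List.isPrefixOf "/MRBTS-".toList ('/' :: cs) = true := by
      rw [List.isPrefixOf_iff_prefix, pvM7_toList]
      exact List.cons_prefix_cons.mpr ⟨rfl, hM⟩
    rw [pvPartAfter]
    simp only [hpre, if_pos]
    have hdrop : List.drop ("/MRBTS-".toList).length ('/' :: cs) = List.drop 6 cs := rfl
    rw [hdrop, pvMatched cs hM]
    rfl
  · have hpre : List.isPrefixOf "/MRBTS-".toList ('/' :: cs) = false := by
      rw [← Bool.not_eq_true, List.isPrefixOf_iff_prefix, pvM7_toList]
      intro hc
      exact hM (List.cons_prefix_cons.mp hc).2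
    rw [pvPartAfter]
    simp only [hpre, Bool.false_eq_true, if_neg, not_false_iff]
    rw [h2]
    obtain ⟨r, hr⟩ := pvSplit_head '/' cs
    have hnp : PySem.Chars.startswith (cs.takeWhile (· ≠ '/')) "MRBTS-".toList = false := by
      rw [← Bool.not_eq_true]
      intro hc
      exact hM (((PySem.Chars.startswith_iff _ _).mp hc).trans (List.takeWhile_prefix _))
    rw [hr, List.tail_cons]
    symm
    simp only [pvLoopA]
    rw [hnp]
    simp

lemma pvMain : ∀ (cs : List Char),
    (pvPartAfter "/MRBTS-".toList cs).map pvF = pvLoopA ((pvSplit '/' cs).tail) := by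
  intro cs
  induction cs with
  | nil => simp [pvPartAfter, pvSplit, pvLoopA]
  | cons a t ih =>
    by_cases ha : a = '/'
    · subst ha
      have hsp : pvSplit '/' ('/' :: t) = [] :: pvSplit '/' t := by simp [pvSplit]
      rw [hsp]
      exact pvStep t ih
    · have hpre : List.isPrefixOf "/MRBTS-".toList (a :: t) = false := by
        rw [← Bool.not_eq_true, List.isPrefixOf_iff_prefix, pvM7_toList]
        intro hc
        exact ha (List.cons_prefix_cons.mp hc).1.symm
      rw [pvPartAfter]
      simp only [hpre, Bool.false_eq_true, if_neg, not_false_iff]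
      rcases hs : pvSplit '/' t with _ | ⟨h1, r⟩
      · exact absurd hs (pvSplit_ne_nil '/' t)
      · have hsp : pvSplit '/' (a :: t) = (a :: h1) :: r := by
          simp [pvSplit, ha, hs]
        rw [hsp, List.tail_cons]
        rw [ih, hs, List.tail_cons]

-- ===== VERDICT (by name: the statement is the Claim_ definition above) =====
theorem extract_site_id_spec : Claim_equal_extract_site_id := by
  intro s _
  unfold Spec_extract_site_id extract_site_id extract_site_id_alt
  have h : "/".toList = ['/'] := rfl
  rw [h, pvSplitOn_eq, ← pvStep s.toList (pvMain s.toList)]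
  rw [Option.map_map]
  rfl
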